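-- pv_equiv track=rewrite | github.com/stnservices/reelin-backend | app/services/content_moderation_service.py | _check_offensive_labels
-- ===== SOURCE A (Python) =====
-- from typing import Optional, List, Set
--
-- OFFENSIVE_LABELS = {
--     "middle finger",
--     "obscene gesture",
--     "rude gesture",
--     "offensive gesture",
--     "fuck",
--     "flipping off",
--     "the finger",
--     "bird gesture",
-- }
--
-- def _check_offensive_labels(labels: List[str]) -> List[str]:
--     """Check if any labels match offensive patterns."""
--     offensive_found = []
--     for label in labels:
--         label_lower = label.lower()
--         for offensive in OFFENSIVE_LABELS:
--             if offensive in label_lower: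
--                 offensive_found.append(label)
--                 break
--     return offensive_found
-- ===== SOURCE B (Python) =====
-- OFFENSIVE_LABELS = {
--     "middle finger",
--     "obscene gesture",
--     "rude gesture",
--     "offensive gesture",
--     "fuck",
--     "flipping off",
--     "the finger",
--     "bird gesture",
-- }
--
-- def _check_offensive_labels(labels):
--     """Inverted loop nesting: sweep the label list once PER TERM, marking
--     matched positions in a boolean mask, then emit the marked labels."""
--     lows = [label.lower() for label in labels]
--     hit = [False] * len(labels)
--     for term in OFFENSIVE_LABELS:
--         for i, low in enumerate(lows):
--             if not hit[i] and term in low: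
--                 hit[i] = True
--     return [label for label, h in zip(labels, hit) if h]
-- ===== Notes on version B (the rewrite author's own statement) =====
-- stated objective: alternative
-- what changed: A scans label-by-label with an inner term loop that breaks on the first hit; B inverts the nesting: it makes one pass over the whole label list per offensive term, accumulating a boolean hit-mask across passes, and finally emits the labels whose mask bit is set (order-independence of the union of matches is what makes this correct).
import Mathlib
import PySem

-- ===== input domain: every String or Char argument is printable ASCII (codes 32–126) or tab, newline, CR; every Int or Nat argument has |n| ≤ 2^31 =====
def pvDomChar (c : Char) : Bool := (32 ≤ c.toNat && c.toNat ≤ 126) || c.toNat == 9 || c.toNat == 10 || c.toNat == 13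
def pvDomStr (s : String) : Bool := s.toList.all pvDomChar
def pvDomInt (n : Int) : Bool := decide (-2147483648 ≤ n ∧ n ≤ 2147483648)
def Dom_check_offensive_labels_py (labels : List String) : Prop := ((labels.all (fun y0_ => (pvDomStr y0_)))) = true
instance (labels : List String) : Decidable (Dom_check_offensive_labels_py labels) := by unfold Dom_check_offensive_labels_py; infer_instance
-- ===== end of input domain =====

-- B inverts A's loop nesting: one sweep over all labels per term, accumulating a boolean
-- hit-mask across the term passes, then one emit pass; alternative, same cost.

-- ===== PORT A =====
-- OFFENSIVE_LABELS (a set literal of distinct strings; iteration order irrelevant to the result)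
def offensiveTerms : List String :=
  ["middle finger", "obscene gesture", "rude gesture", "offensive gesture",
   "fuck", "flipping off", "the finger", "bird gesture"]

-- inner 'for offensive in OFFENSIVE_LABELS: if offensive in label_lower: append; break'
def innerA (acc : List String) (label : String) (low : String) : List String → List String
  | [] => acc
  | t :: rest => if PySem.Str.isIn t low then acc ++ [label] else innerA acc label low rest

def check_offensive_labels_py (labels : List String) : List String :=
  labels.foldl (fun acc label => innerA acc label (PySem.Str.lower label) offensiveTerms) []

-- ===== PORT B =====
-- 'for i, low in enumerate(lows): if not hit[i] and term in low: hit[i] = True'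
-- updates the mask pointwise: ported by hand as a zipWith over (mask, lows) — exact.
def maskPass (lows : List String) (mask : List Bool) (term : String) : List Bool :=
  List.zipWith (fun h low => if !h && PySem.Str.isIn term low then true else h) mask lows

def check_offensive_labels_py_alt (labels : List String) : List String :=
  let lows := labels.map PySem.Str.lower
  let mask := offensiveTerms.foldl (maskPass lows) (List.replicate labels.length false)
  ((labels.zip mask).filter (fun p => p.2)).map (fun p => p.1)

-- ===== PRECONDITION & SPEC =====
def Spec_check_offensive_labels_py (labels : List String) (out : List String) : Prop := out = check_offensive_labels_py_alt labels
instance (labels : List String) (out : List String) : Decidable (Spec_check_offensive_labels_py labels out) := by unfold Spec_check_offensive_labels_py; infer_instance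

-- ===== CLAIM (what is proved, stated in full; the proofs are below) =====
def Claim_equal_check_offensive_labels_py : Prop := ∀ (labels : List String), Dom_check_offensive_labels_py labels → Spec_check_offensive_labels_py labels (check_offensive_labels_py labels)

-- ===== LEMMAS AND PROOFS =====

-- A's inner loop-with-break appends the label iff some term is a substring
theorem innerA_eq (acc : List String) (label low : String) (ts : List String) :
    innerA acc label low ts =
      if ts.any (fun t => PySem.Str.isIn t low) then acc ++ [label] else acc := by
  induction ts with
  | nil => simp [innerA]
  | cons t rest ih =>
    simp only [innerA, List.any_cons, Bool.or_eq_true, ih]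
    by_cases h : PySem.Str.isIn t low = true <;> simp only [PySem.Str.isIn_eq] at h <;>
      simp [h]

-- one mask pass on a mapped mask stays a mapped mask
theorem maskPass_map (lows : List String) (g : String → Bool) (t : String) :
    maskPass lows (lows.map g) t =
      lows.map (fun low => if !(g low) && PySem.Str.isIn t low then true else g low) := by
  unfold maskPass
  induction lows with
  | nil => rfl
  | cons l rest ih => simp only [List.map_cons, List.zipWith_cons_cons, ih]

-- the whole fold of mask passes computes, pointwise, 'some term in ts hits'
theorem maskFold_map (ts : List String) (lows : List String) (g : String → Bool) :
    ts.foldl (maskPass lows) (lows.map g) =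
      lows.map (fun low => g low || ts.any (fun t => PySem.Str.isIn t low)) := by
  induction ts generalizing g with
  | nil => simp
  | cons t rest ih =>
    rw [List.foldl_cons, maskPass_map, ih]
    apply List.map_congr_left
    intro low _
    cases h : g low <;> cases h2 : PySem.Str.isIn t low <;>
      simp only [PySem.Str.isIn_eq] at h2 <;> simp [h, h2]

-- emitting via zip with a mapped mask is a filter
theorem zip_map_filter (labels : List String) (f : String → Bool) :
    (((labels.zip (labels.map f)).filter (fun p => p.2)).map (fun p => p.1)) =
      labels.filter f := by
  induction labels with
  | nil => rfl
  | cons l rest ih =>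
    simp only [List.map_cons, List.zip_cons_cons, List.filter_cons]
    cases h : f l <;> simp [ih]

-- B computes the filter by the same per-label predicate as A
theorem alt_eq_filter (labels : List String) :
    check_offensive_labels_py_alt labels =
      labels.filter (fun label =>
        offensiveTerms.any (fun t => PySem.Str.isIn t (PySem.Str.lower label))) := by
  simp only [check_offensive_labels_py_alt]
  have hrep : List.replicate labels.length false
      = (labels.map PySem.Str.lower).map (fun _ => false) := by
    simp [List.map_const']
  rw [hrep, maskFold_map]
  have : (labels.map PySem.Str.lower).map
        (fun low => false || offensiveTerms.any (fun t => PySem.Str.isIn t low))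
      = labels.map (fun label =>
          offensiveTerms.any (fun t => PySem.Str.isIn t (PySem.Str.lower label))) := by
    simp [List.map_map, Function.comp]
  rw [this, zip_map_filter]

-- ===== VERDICT (by name: the statement is the Claim_ definition above) =====
theorem check_offensive_labels_py_spec : Claim_equal_check_offensive_labels_py := by
  intro labels _
  unfold Spec_check_offensive_labels_py
  rw [alt_eq_filter]
  unfold check_offensive_labels_py
  calc labels.foldl (fun acc label => innerA acc label (PySem.Str.lower label) offensiveTerms) []
      = labels.foldl (fun acc label =>
          if offensiveTerms.any (fun t => PySem.Str.isIn t (PySem.Str.lower label))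
          then acc ++ [label] else acc) [] := by
        exact PySem.List.foldl_congr_mem _ _ _ _ (fun acc label _ => innerA_eq acc label _ _)
    _ = [] ++ labels.filter (fun label =>
          offensiveTerms.any (fun t => PySem.Str.isIn t (PySem.Str.lower label))) :=
        PySem.List.foldl_append_if_eq_filter _ labels []
    _ = _ := by simp
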